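-- pv_equiv track=rewrite | github.com/darsorokinaa/generator | Generator/Generator/views.py | _convert_frac
-- ===== SOURCE A (Python) =====
-- def _extract_balanced(text: str, pos: int) -> tuple[str, int]:
--     """Извлекает содержимое сбалансированных фигурных скобок начиная с pos (на '{')."""
--     assert text[pos] == '{'
--     depth = 0
--     start = pos + 1
--     for i in range(pos, len(text)):
--         if text[i] == '{':
--             depth += 1
--         elif text[i] == '}':
--             depth -= 1
--             if depth == 0:
--                 return text[start:i], i + 1
--     # незакрытая скобка — берём до конца
--     return text[start:], len(text)
--
-- def _convert_frac(text: str) -> str: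
--     """Конвертирует \\frac и \\dfrac с корректной обработкой вложенных скобок."""
--     result = []
--     i = 0
--     while i < len(text):
--         # Ищем ближайший \frac или \dfrac
--         fi = text.find(r'\frac', i)
--         di = text.find(r'\dfrac', i)
--
--         if fi == -1 and di == -1:
--             result.append(text[i:])
--             break
--
--         # Выбираем ближайший; при равенстве позиций предпочитаем \dfrac (длиннее)
--         if di != -1 and (fi == -1 or di <= fi):
--             m_start, cmd_len = di, len(r'\dfrac')
--         else:
--             m_start, cmd_len = fi, len(r'\frac')
--
--         result.append(text[i:m_start])
--         i = m_start + cmd_len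
--         while i < len(text) and text[i] == ' ':
--             i += 1
--         if i >= len(text) or text[i] != '{':
--             result.append(text[m_start:i])
--             continue
--         num, i = _extract_balanced(text, i)
--         while i < len(text) and text[i] == ' ':
--             i += 1
--         if i >= len(text) or text[i] != '{':
--             result.append(f'\\frac{{{num}}}')
--             continue
--         den, i = _extract_balanced(text, i)
--         # Рекурсивно обрабатываем числитель и знаменатель
--         num_html = _convert_frac(num)
--         den_html = _convert_frac(den)
--         result.append(
--             f'<span class="frac">'
--             f'<span class="num">{num_html}</span>'
--             f'<span class="den">{den_html}</span>'
--             f'</span>'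
--         )
--     return ''.join(result)
-- ===== SOURCE B (Python) =====
-- def _extract_balanced(text: str, pos: int) -> tuple[str, int]:
--     """Extracts the content of balanced braces starting at pos (on '{')."""
--     assert text[pos] == '{'
--     depth = 0
--     start = pos + 1
--     for i in range(pos, len(text)):
--         if text[i] == '{':
--             depth += 1
--         elif text[i] == '}':
--             depth -= 1
--             if depth == 0:
--                 return text[start:i], i + 1
--     return text[start:], len(text)
--
-- def _convert_frac(text: str) -> str:
--     # Single left-to-right character scanner: copy literal characters until a
--     # backslash starts \dfrac (checked first) or \frac, then handle the match.
--     out = []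
--     i = 0
--     n = len(text)
--     while i < n:
--         c = text[i]
--         if c != '\\':
--             out.append(c)
--             i += 1
--             continue
--         if text[i:i+6] == '\\dfrac':
--             cmd_len = 6
--         elif text[i:i+5] == '\\frac':
--             cmd_len = 5
--         else:
--             out.append(c)
--             i += 1
--             continue
--         m = i
--         i += cmd_len
--         while i < n and text[i] == ' ':
--             i += 1
--         if i >= n or text[i] != '{':
--             out.append(text[m:i])
--             continue
--         num, i = _extract_balanced(text, i)
--         while i < n and text[i] == ' ':
--             i += 1
--         if i >= n or text[i] != '{':
--             out.append('\\frac{' + num + '}')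
--             continue
--         den, i = _extract_balanced(text, i)
--         out.append(
--             '<span class="frac">'
--             '<span class="num">' + _convert_frac(num) + '</span>'
--             '<span class="den">' + _convert_frac(den) + '</span>'
--             '</span>'
--         )
--     return ''.join(out)
-- ===== Notes on version B (the rewrite author's own statement) =====
-- stated objective: alternative
-- what changed: Replaced the str.find-driven loop (which re-searches the text for both LaTeX commands from each position) with a single left-to-right character scanner that copies literal characters until a backslash and then tests for the 6-char command before the 5-char one.
import Mathlib
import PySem

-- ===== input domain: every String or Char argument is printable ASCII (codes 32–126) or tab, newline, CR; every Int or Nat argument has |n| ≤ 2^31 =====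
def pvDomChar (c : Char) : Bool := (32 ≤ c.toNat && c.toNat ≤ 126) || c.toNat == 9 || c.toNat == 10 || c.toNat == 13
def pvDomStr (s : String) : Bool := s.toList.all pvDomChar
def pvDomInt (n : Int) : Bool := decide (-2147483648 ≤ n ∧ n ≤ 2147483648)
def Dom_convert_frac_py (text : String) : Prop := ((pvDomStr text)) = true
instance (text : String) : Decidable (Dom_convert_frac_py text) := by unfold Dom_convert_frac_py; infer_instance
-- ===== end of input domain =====

-- B rewrites A's find-driven loop as a single left-to-right character scanner (objective: alternative,
-- same cost); the helpers below are shared because both Pythons contain the identical `_extract_balanced`,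
-- space-skip and match-handling code.

-- ===== PORT A =====

def pvFracL : List Char := ['\\', 'f', 'r', 'a', 'c']
def pvDfracL : List Char := ['\\', 'd', 'f', 'r', 'a', 'c']
def pvP1 : List Char := "<span class=\"frac\"><span class=\"num\">".toList
def pvP2 : List Char := "</span><span class=\"den\">".toList
def pvP3 : List Char := "</span></span>".toList
def pvFW : List Char := "\\frac{".toList

-- `while i < len(text) and text[i] == ' ': i += 1`
def pvSkip (text : List Char) (i : Nat) : Nat :=
  if h : i < text.length then
    if text[i] = ' ' then pvSkip text (i + 1) else i
  else i
termination_by text.length - i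

-- the `for i in range(pos, len(text))` loop of `_extract_balanced`
def pvEbGo (text : List Char) (start : Nat) (depth : Int) (i : Nat) :
    Option (List Char × Nat) :=
  if h : i < text.length then
    if text[i] = '{' then pvEbGo text start (depth + 1) (i + 1)
    else if text[i] = '}' then
      if depth - 1 = 0 then some ((text.drop start).take (i - start), i + 1)
      else pvEbGo text start (depth - 1) (i + 1)
    else pvEbGo text start depth (i + 1)
  else none
termination_by text.length - i

-- `_extract_balanced` (a Python slice `text[a:b]` with Nat bounds is `(drop a).take (b-a)`,
-- exact per PySem.List.slice_natCast)
def pvExtract (text : List Char) (pos : Nat) : List Char × Nat :=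
  match pvEbGo text (pos + 1) 0 pos with
  | some r => r
  | none => (text.drop (pos + 1), text.length)

-- the match-handling code both Pythons share verbatim: from `i = m_start + cmd_len` on;
-- returns (emitted chunk, next value of i)
def pvHandle (recur : List Char → List Char) (text : List Char) (m cl : Nat) :
    List Char × Nat :=
  let j := pvSkip text (m + cl)
  if j < text.length ∧ text.getD j ' ' = '{' then
    let ni := pvExtract text j
    let j2 := pvSkip text ni.2
    if j2 < text.length ∧ text.getD j2 ' ' = '{' then
      let d2 := pvExtract text j2
      (pvP1 ++ recur ni.1 ++ pvP2 ++ recur d2.1 ++ pvP3, d2.2)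
    else (pvFW ++ ni.1 ++ ['}'], j2)
  else ((text.drop m).take (j - m), j)

-- A's `while i < len(text)` loop; `lf` is a totality guard only (one unit per iteration,
-- i grows by ≥ 5 per iteration, so `length + 1` at the top never runs out)
def convALoop (recur : List Char → List Char) (text : List Char) :
    Nat → Nat → List Char
  | 0, _ => []
  | lf + 1, i =>
    if i < text.length then
      let fi := PySem.Chars.findFrom text pvFracL (i : Int) none
      let di := PySem.Chars.findFrom text pvDfracL (i : Int) none
      if fi = -1 ∧ di = -1 then text.drop i
      else
        let mc : Nat × Nat :=
          if di ≠ -1 ∧ (fi = -1 ∨ di ≤ fi) then (di.toNat, 6) else (fi.toNat, 5)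
        let h := pvHandle recur text mc.1 mc.2
        (text.drop i).take (mc.1 - i) ++ h.1 ++ convALoop recur text lf h.2
    else []

-- recursion on the numerator/denominator; `fuel` is a totality guard only (nesting depth
-- is bounded by the length, which strictly decreases at each nested call)
def convAGo : Nat → List Char → List Char
  | 0, _ => []
  | fuel + 1, text => convALoop (convAGo fuel) text (text.length + 1) 0

def convert_frac_py (text : String) : String :=
  String.ofList (convAGo (text.toList.length + 1) text.toList)

-- ===== PORT B =====

-- B's scanner loop: copy one literal character per iteration; on a backslash test
-- `text[i:i+6] == '\dfrac'` first, then `text[i:i+5] == '\frac'`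
def convBLoop (recur : List Char → List Char) (text : List Char) :
    Nat → Nat → List Char
  | 0, _ => []
  | lf + 1, i =>
    if hi : i < text.length then
      if text[i] = '\\' then
        if (text.drop i).take 6 = pvDfracL then
          let h := pvHandle recur text i 6
          h.1 ++ convBLoop recur text lf h.2
        else if (text.drop i).take 5 = pvFracL then
          let h := pvHandle recur text i 5
          h.1 ++ convBLoop recur text lf h.2
        else text[i] :: convBLoop recur text lf (i + 1)
      else text[i] :: convBLoop recur text lf (i + 1)
    else []

def convBGo : Nat → List Char → List Char
  | 0, _ => []
  | fuel + 1, text => convBLoop (convBGo fuel) text (text.length + 1) 0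

def convert_frac_py_alt (text : String) : String :=
  String.ofList (convBGo (text.toList.length + 1) text.toList)

-- ===== PRECONDITION & SPEC =====
def Spec_convert_frac_py (text : String) (out : String) : Prop := out = convert_frac_py_alt text
instance (text : String) (out : String) : Decidable (Spec_convert_frac_py text out) := by unfold Spec_convert_frac_py; infer_instance

-- ===== CLAIM (what is proved, stated in full; the proofs are below) =====
def Claim_equal_convert_frac_py : Prop := ∀ (text : String), Dom_convert_frac_py text → Spec_convert_frac_py text (convert_frac_py text)

-- ===== LEMMAS AND PROOFS =====

theorem pvEbGo_bounds (text : List Char) (st : Nat) :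
    ∀ (n i : Nat) (d : Int) (r : List Char × Nat), text.length - i ≤ n →
    pvEbGo text st d i = some r → i < r.2 ∧ r.2 ≤ text.length := by
  intro n
  induction n with
  | zero =>
    intro i d r hn h
    rw [pvEbGo] at h
    rw [dif_neg (by omega)] at h
    simp at h
  | succ n ih =>
    intro i d r hn h
    rw [pvEbGo] at h
    by_cases hlt : i < text.length
    · rw [dif_pos hlt] at h
      split_ifs at h with h1 h2 h3
      · have := ih (i+1) (d+1) r (by omega) h; omega
      · simp only [Option.some.injEq] at h; subst h; simp; omega
      · have := ih (i+1) (d-1) r (by omega) h; omega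
      · have := ih (i+1) d r (by omega) h; omega
    · rw [dif_neg hlt] at h; simp at h

theorem pvExtract_bounds (text : List Char) (pos : Nat) (h : pos < text.length) :
    pos < (pvExtract text pos).2 ∧ (pvExtract text pos).2 ≤ text.length := by
  unfold pvExtract
  cases heq : pvEbGo text (pos + 1) 0 pos with
  | some r =>
    have := pvEbGo_bounds text (pos+1) text.length pos 0 r (by omega) heq
    simpa using this
  | none => simp; omega
theorem le_pvSkip (text : List Char) (i : Nat) : i ≤ pvSkip text i := by
  fun_induction pvSkip <;> omega

theorem pvSkip_le (text : List Char) (i : Nat) (h : i ≤ text.length) :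
    pvSkip text i ≤ text.length := by
  fun_induction pvSkip with
  | case1 i h heq ih => exact ih (by omega)
  | case2 => omega
  | case3 => omega

theorem pvHandle_bounds (recur : List Char → List Char) (text : List Char) (m cl : Nat)
    (hcl : 5 ≤ cl) (hml : m + cl ≤ text.length) :
    m < (pvHandle recur text m cl).2 ∧ (pvHandle recur text m cl).2 ≤ text.length := by
  unfold pvHandle
  have hj1 := le_pvSkip text (m + cl)
  have hj2 := pvSkip_le text (m + cl) (by omega)
  by_cases hb : pvSkip text (m + cl) < text.length ∧ text.getD (pvSkip text (m + cl)) ' ' = '{'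
  · rw [if_pos hb]
    have he := pvExtract_bounds text (pvSkip text (m + cl)) hb.1
    have hj21 := le_pvSkip text (pvExtract text (pvSkip text (m + cl))).2
    have hj22 := pvSkip_le text (pvExtract text (pvSkip text (m + cl))).2 (by omega)
    by_cases hb2 : pvSkip text (pvExtract text (pvSkip text (m + cl))).2 < text.length ∧
        text.getD (pvSkip text (pvExtract text (pvSkip text (m + cl))).2) ' ' = '{'
    · rw [if_pos hb2]
      have := pvExtract_bounds text (pvSkip text (pvExtract text (pvSkip text (m + cl))).2) hb2.1
      dsimp only
      omega
    · rw [if_neg hb2]; dsimp only; omega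
  · rw [if_neg hb]; dsimp only; omega

theorem noPrefix_of_find_neg (text sub : List Char) (i j : Nat)
    (hi : i ≤ text.length)
    (h : PySem.Chars.findFrom text sub (i : Int) none = -1) (hj : i ≤ j) :
    ¬ sub <+: text.drop j := by
  rw [PySem.Chars.findFrom_natCast_eq_neg_one_iff text sub i hi] at h
  intro hp
  apply h
  have hdj : text.drop j = (text.drop i).drop (j - i) := by
    rw [List.drop_drop]; congr 1; omega
  rw [hdj] at hp
  exact hp.isInfix.trans (List.drop_suffix _ _).isInfix
theorem lemScan (k : Nat) : ∀ (recur : List Char → List Char) (text : List Char)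
    (i m lf : Nat), i ≤ m → m ≤ text.length → m - i ≤ k →
    (∀ j, i ≤ j → j < m → ¬ pvDfracL <+: text.drop j ∧ ¬ pvFracL <+: text.drop j) →
    convBLoop recur text (lf + (m - i)) i =
      (text.drop i).take (m - i) ++ convBLoop recur text lf m := by
  induction k with
  | zero =>
    intro recur text i m lf him hml hk hnp
    have : i = m := by omega
    subst this
    simp
  | succ k ih =>
    intro recur text i m lf him hml hk hnp
    by_cases he : i = m
    · subst he; simp
    · have hi : i < text.length := by omega
      have hnpi := hnp i (le_refl i) (by omega)
      have h6 : ¬ ((text.drop i).take 6 = pvDfracL) := by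
        intro hq
        exact hnpi.1 (by rw [List.prefix_iff_eq_take]; exact hq.symm)
      have h5 : ¬ ((text.drop i).take 5 = pvFracL) := by
        intro hq
        exact hnpi.2 (by rw [List.prefix_iff_eq_take]; exact hq.symm)
      have hfuel : lf + (m - i) = (lf + (m - (i+1))) + 1 := by omega
      rw [hfuel]
      rw [convBLoop]
      rw [dif_pos hi]
      have hrhs : (text.drop i).take (m - i) =
          text[i] :: (text.drop (i+1)).take (m - (i+1)) := by
        rw [List.drop_eq_getElem_cons hi, show m - i = (m - (i+1)) + 1 by omega,
          List.take_succ_cons]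
      rw [hrhs]
      by_cases hc : text[i] = '\\'
      · rw [if_pos hc, if_neg h6, if_neg h5]
        rw [ih recur text (i+1) m lf (by omega) hml (by omega)
          (fun j hj1 hj2 => hnp j (by omega) hj2)]
        simp
      · rw [if_neg hc]
        rw [ih recur text (i+1) m lf (by omega) hml (by omega)
          (fun j hj1 hj2 => hnp j (by omega) hj2)]
        simp
theorem convBLoop_at_end (recur : List Char → List Char) (text : List Char)
    (lf i : Nat) (h : text.length ≤ i) : convBLoop recur text lf i = [] := by
  cases lf with
  | zero => rfl
  | succ lf => rw [convBLoop, dif_neg (by omega)]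

theorem char_backslash_of_prefix (text sub : List Char) (m : Nat) (hm : m < text.length)
    (hs : sub.head? = some '\\') (hp : sub <+: text.drop m) : text[m] = '\\' := by
  rw [List.drop_eq_getElem_cons hm] at hp
  cases sub with
  | nil => simp at hs
  | cons a l =>
    simp at hs
    obtain ⟨h1, _⟩ := List.cons_prefix_cons.mp hp
    rw [← h1, hs]

theorem pvHandle_congr (ra rb : List Char → List Char) (text : List Char) (m cl : Nat)
    (hrec : ∀ s, ra s = rb s) : pvHandle ra text m cl = pvHandle rb text m cl := by
  have : ra = rb := funext hrec
  rw [this]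

theorem lemMain (k : Nat) : ∀ (text : List Char) (ra rb : List Char → List Char),
    (∀ s, ra s = rb s) → ∀ (i lfa lfb : Nat), text.length - i ≤ k →
    text.length - i < lfa → text.length - i < lfb →
    convALoop ra text lfa i = convBLoop rb text lfb i := by
  induction k using Nat.strong_induction_on with
  | _ k ih =>
  intro text ra rb hrec i lfa lfb hk hla hlb
  obtain ⟨la, rfl⟩ : ∃ la, lfa = la + 1 := ⟨lfa - 1, by omega⟩
  obtain ⟨lb, rfl⟩ : ∃ lb, lfb = lb + 1 := ⟨lfb - 1, by omega⟩
  by_cases hi : i < text.length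
  · rw [convALoop, if_pos hi]
    try dsimp only
    by_cases hnn : PySem.Chars.findFrom text pvFracL (i : Int) none = -1 ∧
        PySem.Chars.findFrom text pvDfracL (i : Int) none = -1
    · -- no match anywhere: A emits the rest; B copies it char by char
      rw [if_pos hnn]
      have hnp : ∀ j, i ≤ j → j < text.length →
          ¬ pvDfracL <+: text.drop j ∧ ¬ pvFracL <+: text.drop j := by
        intro j hj _
        exact ⟨noPrefix_of_find_neg text pvDfracL i j (by omega) hnn.2 hj,
               noPrefix_of_find_neg text pvFracL i j (by omega) hnn.1 hj⟩
      have hsplit : lb + 1 = (lb + 1 - (text.length - i)) + (text.length - i) := by omega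
      rw [hsplit, lemScan (text.length - i) rb text i text.length _ (by omega)
        (le_refl _) (le_refl _) hnp]
      rw [convBLoop_at_end rb text _ _ (le_refl _), List.append_nil,
        ← List.length_drop, List.take_length]
    · rw [if_neg hnn]
      try dsimp only
      by_cases hd : PySem.Chars.findFrom text pvDfracL (i : Int) none ≠ -1 ∧
          (PySem.Chars.findFrom text pvFracL (i : Int) none = -1 ∨
            PySem.Chars.findFrom text pvDfracL (i : Int) none ≤
              PySem.Chars.findFrom text pvFracL (i : Int) none)
      · -- \dfrac chosen at m = di.toNat
        rw [if_pos hd]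
        try dsimp only
        obtain ⟨hge, hpre, hmin⟩ :=
          PySem.Chars.findFrom_natCast_spec text pvDfracL i (by omega) hd.1
        have hm6 : (PySem.Chars.findFrom text pvDfracL (i : Int) none).toNat + 6 ≤
            text.length := by
          have h1 := hpre.length_le
          simp [List.length_drop] at h1
          have h2 : pvDfracL.length = 6 := rfl
          omega
        have hnp : ∀ j, i ≤ j →
            j < (PySem.Chars.findFrom text pvDfracL (i : Int) none).toNat →
            ¬ pvDfracL <+: text.drop j ∧ ¬ pvFracL <+: text.drop j := by
          intro j hj1 hj2
          refine ⟨hmin j hj1 hj2, ?_⟩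
          rcases hd.2 with hf1 | hf2
          · exact noPrefix_of_find_neg text pvFracL i j (by omega) hf1 hj1
          · obtain ⟨hgeF, _, hminF⟩ :=
              PySem.Chars.findFrom_natCast_spec text pvFracL i (by omega) (by omega)
            exact hminF j hj1 (by omega)
        have hsplit : lb + 1 = ((lb + 1 -
            ((PySem.Chars.findFrom text pvDfracL (i : Int) none).toNat - i) - 1) + 1) +
            ((PySem.Chars.findFrom text pvDfracL (i : Int) none).toNat - i) := by omega
        rw [hsplit, lemScan ((PySem.Chars.findFrom text pvDfracL (i : Int) none).toNat - i)
          rb text i _ _ (by omega) (by omega) (le_refl _) hnp]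
        rw [convBLoop, dif_pos (show (PySem.Chars.findFrom text pvDfracL (i : Int) none).toNat <
          text.length by omega)]
        rw [if_pos (char_backslash_of_prefix text pvDfracL _ (by omega) rfl hpre)]
        have htake := (List.prefix_iff_eq_take.mp hpre).symm
        rw [show pvDfracL.length = 6 from rfl] at htake
        rw [if_pos htake]
        try dsimp only
        rw [pvHandle_congr ra rb text _ 6 hrec, List.append_assoc]
        congr 1
        congr 1
        have hb := pvHandle_bounds rb text _ 6 (by omega) hm6
        exact ih (text.length - (pvHandle rb text
            (PySem.Chars.findFrom text pvDfracL (i : Int) none).toNat 6).2)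
          (by omega) text ra rb hrec _ la _ (le_refl _) (by omega) (by omega)
      · -- \frac chosen at m = fi.toNat
        rw [if_neg hd]
        try dsimp only
        have hfne : PySem.Chars.findFrom text pvFracL (i : Int) none ≠ -1 := by
          intro h0
          exact hd ⟨by tauto, Or.inl h0⟩
        obtain ⟨hge, hpre, hmin⟩ :=
          PySem.Chars.findFrom_natCast_spec text pvFracL i (by omega) hfne
        have hm5 : (PySem.Chars.findFrom text pvFracL (i : Int) none).toNat + 5 ≤
            text.length := by
          have h1 := hpre.length_le
          simp [List.length_drop] at h1
          have h2 : pvFracL.length = 5 := rfl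
          omega
        have hcase : PySem.Chars.findFrom text pvDfracL (i : Int) none = -1 ∨
            PySem.Chars.findFrom text pvFracL (i : Int) none <
              PySem.Chars.findFrom text pvDfracL (i : Int) none := by
          by_cases hdne : PySem.Chars.findFrom text pvDfracL (i : Int) none = -1
          · exact Or.inl hdne
          · right
            by_contra hcon
            exact hd ⟨hdne, Or.inr (by omega)⟩
        have hnd : ∀ j, i ≤ j →
            j ≤ (PySem.Chars.findFrom text pvFracL (i : Int) none).toNat →
            ¬ pvDfracL <+: text.drop j := by
          intro j hj1 hj2
          rcases hcase with hc1 | hc2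
          · exact noPrefix_of_find_neg text pvDfracL i j (by omega) hc1 hj1
          · obtain ⟨hgeD, _, hminD⟩ :=
              PySem.Chars.findFrom_natCast_spec text pvDfracL i (by omega) (by omega)
            exact hminD j hj1 (by omega)
        have hnp : ∀ j, i ≤ j →
            j < (PySem.Chars.findFrom text pvFracL (i : Int) none).toNat →
            ¬ pvDfracL <+: text.drop j ∧ ¬ pvFracL <+: text.drop j := by
          intro j hj1 hj2
          exact ⟨hnd j hj1 (by omega), hmin j hj1 hj2⟩
        have hsplit : lb + 1 = ((lb + 1 -
            ((PySem.Chars.findFrom text pvFracL (i : Int) none).toNat - i) - 1) + 1) +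
            ((PySem.Chars.findFrom text pvFracL (i : Int) none).toNat - i) := by omega
        rw [hsplit, lemScan ((PySem.Chars.findFrom text pvFracL (i : Int) none).toNat - i)
          rb text i _ _ (by omega) (by omega) (le_refl _) hnp]
        rw [convBLoop, dif_pos (show (PySem.Chars.findFrom text pvFracL (i : Int) none).toNat <
          text.length by omega)]
        rw [if_pos (char_backslash_of_prefix text pvFracL _ (by omega) rfl hpre)]
        rw [if_neg (show ¬ ((text.drop
            (PySem.Chars.findFrom text pvFracL (i : Int) none).toNat).take 6 = pvDfracL) by
          intro hq
          apply hnd _ (by omega) (le_refl _)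
          rw [List.prefix_iff_eq_take, show pvDfracL.length = 6 from rfl]
          exact hq.symm)]
        have htake := (List.prefix_iff_eq_take.mp hpre).symm
        rw [show pvFracL.length = 5 from rfl] at htake
        rw [if_pos htake]
        try dsimp only
        rw [pvHandle_congr ra rb text _ 5 hrec, List.append_assoc]
        congr 1
        congr 1
        have hb := pvHandle_bounds rb text _ 5 (by omega) hm5
        exact ih (text.length - (pvHandle rb text
            (PySem.Chars.findFrom text pvFracL (i : Int) none).toNat 5).2)
          (by omega) text ra rb hrec _ la _ (le_refl _) (by omega) (by omega)
  · rw [convALoop, convBLoop, if_neg hi, dif_neg hi]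

theorem go_eq (fuel : Nat) : ∀ text : List Char, convAGo fuel text = convBGo fuel text := by
  induction fuel with
  | zero => intro text; rfl
  | succ n ih =>
    intro text
    show convALoop (convAGo n) text (text.length + 1) 0 =
      convBLoop (convBGo n) text (text.length + 1) 0
    exact lemMain text.length text _ _ ih 0 _ _ (by omega) (by omega) (by omega)

-- ===== VERDICT (by name: the statement is the Claim_ definition above) =====
theorem convert_frac_py_spec : Claim_equal_convert_frac_py := by
  intro text _
  show convert_frac_py text = convert_frac_py_alt text
  unfold convert_frac_py convert_frac_py_alt
  rw [go_eq]
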